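-- pv_equiv track=rewrite | github.com/wsrf16/tedt | algorithm/total/search/search.py | brackets1
-- ===== SOURCE A (Python) =====
-- def brackets1(lst: list):
--     length = len(lst)
--     left, right = None, None
--     new_lst: list = []
--
--     pair = 0
--     for i, itm_i in enumerate(lst):
--         if itm_i == ')':
--             if pair == 0:
--                 continue
--             if pair == 1:
--                 new_lst.append(itm_i)
--                 pair = 0
--                 continue
--         elif itm_i == '(':
--             if pair == 0:
--                 new_lst.append(itm_i)
--                 pair = 1
--                 left = len(new_lst) - 1
--                 continue
--             if pair == 1:
--                 continue
--         else:
--             new_lst.append(itm_i)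
--     if pair == 1:
--         new_lst.pop(left)
--     return new_lst
-- ===== SOURCE B (Python) =====
-- def brackets1(lst: list):
--     # One pass computing the set of original indices of brackets to keep,
--     # then a filtering comprehension over the input (indices, not a mutated list).
--     keep = set()
--     open_flag = False
--     open_idx = -1
--     for i, x in enumerate(lst):
--         if x == '(':
--             if not open_flag:
--                 keep.add(i)
--                 open_flag = True
--                 open_idx = i
--         elif x == ')':
--             if open_flag:
--                 keep.add(i)
--                 open_flag = False
--     if open_flag:
--         keep.discard(open_idx)
--     return [x for i, x in enumerate(lst) if x not in ('(', ')') or i in keep]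
-- ===== Notes on version B (the rewrite author's own statement) =====
-- stated objective: alternative
-- what changed: Instead of A's building a mutable output list while tracking a pop-back index for a dangling '(', B first computes the set of input indices of brackets that survive (one pass, discarding a dangling open index at the end) and then produces the result as an index-based filter of the input.
import Mathlib
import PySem

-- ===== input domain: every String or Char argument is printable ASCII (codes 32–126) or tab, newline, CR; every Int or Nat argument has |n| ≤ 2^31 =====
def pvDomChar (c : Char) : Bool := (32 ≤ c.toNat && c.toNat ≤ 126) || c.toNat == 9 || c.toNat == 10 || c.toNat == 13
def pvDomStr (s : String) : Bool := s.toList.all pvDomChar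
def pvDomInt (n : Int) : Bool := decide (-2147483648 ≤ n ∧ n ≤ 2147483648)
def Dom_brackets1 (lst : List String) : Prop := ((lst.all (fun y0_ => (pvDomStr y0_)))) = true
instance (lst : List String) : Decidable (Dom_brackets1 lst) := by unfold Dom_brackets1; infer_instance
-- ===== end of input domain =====

-- B first collects the set of kept bracket indices in one pass, then filters the input by
-- index (objective: alternative decomposition, same cost; no observable mutation in either).

-- ===== PORT A =====
-- loop body of A (state: new_lst, pair, left)
def brStepA (st : List String × Int × Option Int) (itm_i : String) : List String × Int × Option Int :=
  let new_lst := st.1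
  let pair := st.2.1
  let left := st.2.2
  if itm_i == ")" then
    if pair == 0 then (new_lst, pair, left)
    else if pair == 1 then (new_lst ++ [itm_i], 0, left)
    else (new_lst, pair, left)
  else if itm_i == "(" then
    if pair == 0 then
      let nl := new_lst ++ [itm_i]
      (nl, 1, some ((nl.length : Int) - 1))
    else (new_lst, pair, left)
  else (new_lst ++ [itm_i], pair, left)

-- A's trailer: if pair == 1, new_lst.pop(left); pair == 1 always comes with a valid
-- 'some' index here, so the 'none'/getD fallbacks below are unreachable.
def brFinishA (st : List String × Int × Option Int) : List String :=
  if st.2.1 == 1 then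
    match st.2.2 with
    | some l => ((PySem.List.pop? st.1 l).map (·.2)).getD st.1
    | none => st.1
  else st.1

def brackets1 (lst : List String) : List String :=
  brFinishA (lst.foldl brStepA ([], 0, none))

-- ===== PORT B =====
-- loop body of B (state: keep, open_flag, open_idx)
def brStepB (st : PySem.Set Int × Bool × Int) (p : Int × String) : PySem.Set Int × Bool × Int :=
  let keep := st.1
  let opn := st.2.1
  let oi := st.2.2
  if p.2 == "(" then
    if !opn then (PySem.Set.add keep p.1, true, p.1) else st
  else if p.2 == ")" then
    if opn then (PySem.Set.add keep p.1, false, oi) else st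
  else st

def brackets1_alt (lst : List String) : List String :=
  let st := (PySem.List.enumerate lst).foldl brStepB (PySem.Set.empty, false, -1)
  let keep := if st.2.1 then PySem.Set.discard st.1 st.2.2 else st.1
  (PySem.List.enumerate lst).filterMap (fun p =>
    if (p.2 != "(" && p.2 != ")") || PySem.Set.contains keep p.1 then some p.2 else none)

-- ===== PRECONDITION & SPEC =====
def Spec_brackets1 (lst : List String) (out : List String) : Prop := out = brackets1_alt lst
instance (lst : List String) (out : List String) : Decidable (Spec_brackets1 lst out) := by unfold Spec_brackets1; infer_instance

-- ===== CLAIM (what is proved, stated in full; the proofs are below) =====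
def Claim_equal_brackets1 : Prop := ∀ (lst : List String), Dom_brackets1 lst → Spec_brackets1 lst (brackets1 lst)

-- ===== LEMMAS AND PROOFS =====

lemma brMem_of_contains {s : PySem.Set Int} {j : Int}
    (h : PySem.Set.contains s j = true) : j ∈ s := (PySem.Set.contains_iff s j).mp h

lemma brNotMem_of_contains {s : PySem.Set Int} {j : Int}
    (h : PySem.Set.contains s j = false) : j ∉ s :=
  fun hm => Bool.false_ne_true (h.symm.trans ((PySem.Set.contains_iff s j).mpr hm))

-- B's final keep set (the discard of a dangling open index)
def brFinKeep (st : PySem.Set Int × Bool × Int) : PySem.Set Int :=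
  if st.2.1 then PySem.Set.discard st.1 st.2.2 else st.1

lemma brContains_brFinKeep_of_ne (st : PySem.Set Int × Bool × Int) (j : Int)
    (h : st.2.1 = true → j ≠ st.2.2) :
    PySem.Set.contains (brFinKeep st) j = PySem.Set.contains st.1 j := by
  unfold brFinKeep
  cases hb : st.2.1
  · simp
  · simp [PySem.Set.mem_discard, h hb]

lemma brContains_brFinKeep_false (st : PySem.Set Int × Bool × Int) (j : Int)
    (h : PySem.Set.contains st.1 j = false) :
    PySem.Set.contains (brFinKeep st) j = false := by
  have hj : j ∉ st.1 := brNotMem_of_contains h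
  unfold brFinKeep
  cases hb : st.2.1
  · simpa using h
  · simp [PySem.Set.mem_discard, hj]

-- B's final filtering pass, as structural recursion on the list with an index offset
def brFilterK (keep : PySem.Set Int) : Int → List String → List String
  | _, [] => []
  | i, x :: xs =>
      (if (x != "(" && x != ")") || PySem.Set.contains keep i then [x] else []) ++ brFilterK keep (i + 1) xs

lemma brFilterK_bridge (keep : PySem.Set Int) (xs : List String) : ∀ (s : Int),
    (PySem.List.enumerate xs s).filterMap (fun p =>
      if (p.2 != "(" && p.2 != ")") || PySem.Set.contains keep p.1 then some p.2 else none)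
    = brFilterK keep s xs := by
  induction xs with
  | nil => intro s; simp [PySem.List.enumerate_nil, brFilterK]
  | cons x xs ih =>
      intro s
      rw [PySem.List.enumerate_cons, List.filterMap_cons]
      cases hc : ((x != "(" && x != ")") || PySem.Set.contains keep s)
      · simp only [brFilterK, hc]
        simpa using ih (s + 1)
      · simp only [brFilterK, hc]
        simpa using ih (s + 1)

-- facts about B's index-collecting fold: it never touches indices below the current offset,
-- and a final open index is the carried-in one (with the flag already open) or ≥ the offset
lemma brFoldB_facts (xs : List String) : ∀ (s : Int) (k : PySem.Set Int) (o : Bool) (oi : Int),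
    (∀ j : Int, j < s →
      PySem.Set.contains ((PySem.List.enumerate xs s).foldl brStepB (k, o, oi)).1 j
        = PySem.Set.contains k j) ∧
    (((PySem.List.enumerate xs s).foldl brStepB (k, o, oi)).2.1 = true →
      (o = true ∧ ((PySem.List.enumerate xs s).foldl brStepB (k, o, oi)).2.2 = oi) ∨
      s ≤ ((PySem.List.enumerate xs s).foldl brStepB (k, o, oi)).2.2) := by
  induction xs with
  | nil =>
      intro s k o oi
      simp only [PySem.List.enumerate_nil, List.foldl_nil]
      refine ⟨?_, ?_⟩
      · simp
      · intro h; exact Or.inl ⟨h, by trivial⟩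
  | cons x xs ih =>
      intro s k o oi
      rw [PySem.List.enumerate_cons]
      simp only [List.foldl_cons]
      by_cases hop : x = "("
      · subst hop
        cases o with
        | false =>
            have hb : brStepB (k, false, oi) (s, "(") = (PySem.Set.add k s, true, s) := by
              simp [brStepB]
            rw [hb]
            obtain ⟨h1, h2⟩ := ih (s + 1) (PySem.Set.add k s) true s
            refine ⟨fun j hj => ?_, fun hopen => ?_⟩
            · rw [h1 j (by omega)]
              simp [PySem.Set.mem_add, (show j ≠ s by omega)]
            · rcases h2 hopen with ⟨_, h⟩ | h
              · right; omega
              · right; omega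
        | true =>
            have hb : brStepB (k, true, oi) (s, "(") = (k, true, oi) := by simp [brStepB]
            rw [hb]
            obtain ⟨h1, h2⟩ := ih (s + 1) k true oi
            refine ⟨fun j hj => h1 j (by omega), fun hopen => ?_⟩
            rcases h2 hopen with ⟨_, h⟩ | h
            · exact Or.inl ⟨rfl, h⟩
            · right; omega
      · by_cases hcl : x = ")"
        · subst hcl
          cases o with
          | true =>
              have hb : brStepB (k, true, oi) (s, ")") = (PySem.Set.add k s, false, oi) := by
                simp [brStepB]
              rw [hb]
              obtain ⟨h1, h2⟩ := ih (s + 1) (PySem.Set.add k s) false oi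
              refine ⟨fun j hj => ?_, fun hopen => ?_⟩
              · rw [h1 j (by omega)]
                simp [PySem.Set.mem_add, (show j ≠ s by omega)]
              · rcases h2 hopen with ⟨hf, _⟩ | h
                · exact absurd hf (by simp)
                · right; omega
          | false =>
              have hb : brStepB (k, false, oi) (s, ")") = (k, false, oi) := by simp [brStepB]
              rw [hb]
              obtain ⟨h1, h2⟩ := ih (s + 1) k false oi
              refine ⟨fun j hj => h1 j (by omega), fun hopen => ?_⟩
              rcases h2 hopen with ⟨hf, _⟩ | h
              · exact absurd hf (by simp)
              · right; omega
        · have hb : brStepB (k, o, oi) (s, x) = (k, o, oi) := by simp [brStepB, hop, hcl]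
          rw [hb]
          obtain ⟨h1, h2⟩ := ih (s + 1) k o oi
          refine ⟨fun j hj => h1 j (by omega), fun hopen => ?_⟩
          rcases h2 hopen with ⟨ho, h⟩ | h
          · exact Or.inl ⟨ho, h⟩
          · right; omega

lemma brPop_mid (u v : List String) :
    PySem.List.pop? (u ++ "(" :: v) ((u.length : Int)) = some ("(", u ++ v) := by
  have hlt : u.length < (u ++ "(" :: v).length := by simp
  rw [PySem.List.pop?_natCast _ _ hlt]
  congr 1
  refine Prod.ext ?_ ?_
  · simp [List.getElem_append_right (Nat.le_refl u.length)]
  · induction u with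
    | nil => rfl
    | cons a u ihu => simpa using ihu

-- the main invariant: A's running state against B's index fold, in both loop modes
lemma brMain (xs : List String) : ∀ (i0 : Int) (k : PySem.Set Int) (oi : Int),
    (∀ j : Int, j ∈ k → j < i0) →
    ((∀ (nl : List String) (left : Option Int),
        brFinishA (xs.foldl brStepA (nl, 0, left))
          = nl ++ brFilterK (brFinKeep ((PySem.List.enumerate xs i0).foldl brStepB (k, false, oi))) i0 xs)
    ∧ (∀ (u v : List String), oi < i0 →
        brFinishA (xs.foldl brStepA (u ++ "(" :: v, 1, some (u.length : Int)))
          = (if ((PySem.List.enumerate xs i0).foldl brStepB (k, true, oi)).2.1 &&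
                (((PySem.List.enumerate xs i0).foldl brStepB (k, true, oi)).2.2 == oi)
             then u ++ v else u ++ "(" :: v)
            ++ brFilterK (brFinKeep ((PySem.List.enumerate xs i0).foldl brStepB (k, true, oi))) i0 xs)) := by
  induction xs with
  | nil =>
      intro i0 k oi hk
      constructor
      · intro nl left
        simp [brFinishA, brFilterK]
      · intro u v _
        simp [PySem.List.enumerate_nil, brFinishA, brFilterK, brPop_mid]
  | cons x xs ih =>
      intro i0 k oi hk
      have hkF : PySem.Set.contains k i0 = false := by
        have : i0 ∉ k := fun hm => absurd (hk i0 hm) (by omega)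
        simp [this]
      rw [PySem.List.enumerate_cons]
      constructor
      · -- closed mode
        intro nl left
        rw [List.foldl_cons, List.foldl_cons]
        by_cases hcl : x = ")"
        · subst hcl
          have ha : brStepA (nl, 0, left) ")" = (nl, 0, left) := by simp [brStepA]
          have hb : brStepB (k, false, oi) (i0, ")") = (k, false, oi) := by simp [brStepB]
          rw [ha, hb, (ih (i0 + 1) k oi (fun j hj => by have := hk j hj; omega)).1 nl left]
          have hc0 : PySem.Set.contains
              (brFinKeep ((PySem.List.enumerate xs (i0 + 1)).foldl brStepB (k, false, oi))) i0 = false := by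
            apply brContains_brFinKeep_false
            rw [(brFoldB_facts xs (i0 + 1) k false oi).1 i0 (by omega)]
            exact hkF
          simp [brFilterK, brNotMem_of_contains hc0]
        · by_cases hop : x = "("
          · subst hop
            have ha : brStepA (nl, 0, left) "(" = (nl ++ ["("], 1, some (nl.length : Int)) := by
              simp [brStepA]
            have hb : brStepB (k, false, oi) (i0, "(") = (PySem.Set.add k i0, true, i0) := by
              simp [brStepB]
            have hmem : ∀ j : Int, j ∈ PySem.Set.add k i0 → j < i0 + 1 := by
              intro j hj
              rcases (PySem.Set.mem_add k i0 j).mp hj with h | h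
              · have := hk j h; omega
              · omega
            have IH := (ih (i0 + 1) (PySem.Set.add k i0) i0 hmem).2 nl [] (by omega)
            rw [ha, hb]
            rw [show nl ++ ["("] = nl ++ "(" :: [] from rfl, IH]
            have h1 : PySem.Set.contains
                ((PySem.List.enumerate xs (i0 + 1)).foldl brStepB (PySem.Set.add k i0, true, i0)).1 i0 = true := by
              rw [(brFoldB_facts xs (i0 + 1) (PySem.Set.add k i0) true i0).1 i0 (by omega)]
              simp [PySem.Set.mem_add]
            cases ho : ((PySem.List.enumerate xs (i0 + 1)).foldl brStepB (PySem.Set.add k i0, true, i0)).2.1 with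
            | false =>
                have hcK : PySem.Set.contains
                    (brFinKeep ((PySem.List.enumerate xs (i0 + 1)).foldl brStepB (PySem.Set.add k i0, true, i0))) i0 = true := by
                  rw [brContains_brFinKeep_of_ne _ _ (fun hcontra => absurd hcontra (by simp [ho]))]
                  exact h1
                simp [brFilterK, brMem_of_contains hcK]
            | true =>
                by_cases heq : ((PySem.List.enumerate xs (i0 + 1)).foldl brStepB (PySem.Set.add k i0, true, i0)).2.2 = i0
                · have hcK : PySem.Set.contains
                      (brFinKeep ((PySem.List.enumerate xs (i0 + 1)).foldl brStepB (PySem.Set.add k i0, true, i0))) i0 = false := by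
                    unfold brFinKeep
                    rw [ho, if_pos rfl]
                    simp [PySem.Set.mem_discard, heq]
                  simp [brFilterK, brNotMem_of_contains hcK, heq]
                · have hcK : PySem.Set.contains
                      (brFinKeep ((PySem.List.enumerate xs (i0 + 1)).foldl brStepB (PySem.Set.add k i0, true, i0))) i0 = true := by
                    rw [brContains_brFinKeep_of_ne _ _ (fun _ => fun hc => heq hc.symm)]
                    exact h1
                  simp [brFilterK, brMem_of_contains hcK, heq]
          · have ha : brStepA (nl, 0, left) x = (nl ++ [x], 0, left) := by
              simp [brStepA, hop, hcl]
            have hb : brStepB (k, false, oi) (i0, x) = (k, false, oi) := by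
              simp [brStepB, hop, hcl]
            rw [ha, hb, (ih (i0 + 1) k oi (fun j hj => by have := hk j hj; omega)).1 (nl ++ [x]) left]
            simp [brFilterK, hop, hcl]
      · -- open mode
        intro u v hoi
        rw [List.foldl_cons, List.foldl_cons]
        by_cases hcl : x = ")"
        · subst hcl
          have ha : brStepA (u ++ "(" :: v, 1, some (u.length : Int)) ")"
              = ((u ++ "(" :: v) ++ [")"], 0, some (u.length : Int)) := by simp [brStepA]
          have hb : brStepB (k, true, oi) (i0, ")") = (PySem.Set.add k i0, false, oi) := by
            simp [brStepB]
          have hmem : ∀ j : Int, j ∈ PySem.Set.add k i0 → j < i0 + 1 := by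
            intro j hj
            rcases (PySem.Set.mem_add k i0 j).mp hj with h | h
            · have := hk j h; omega
            · omega
          rw [ha, hb, (ih (i0 + 1) (PySem.Set.add k i0) oi hmem).1 ((u ++ "(" :: v) ++ [")"]) (some (u.length : Int))]
          have hge : ((PySem.List.enumerate xs (i0 + 1)).foldl brStepB (PySem.Set.add k i0, false, oi)).2.1 = true →
              i0 + 1 ≤ ((PySem.List.enumerate xs (i0 + 1)).foldl brStepB (PySem.Set.add k i0, false, oi)).2.2 := by
            intro hopen
            rcases (brFoldB_facts xs (i0 + 1) (PySem.Set.add k i0) false oi).2 hopen with ⟨hf, _⟩ | h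
            · exact absurd hf (by simp)
            · exact h
          have hne : ((PySem.List.enumerate xs (i0 + 1)).foldl brStepB (PySem.Set.add k i0, false, oi)).2.1 = true →
              (i0 : Int) ≠ ((PySem.List.enumerate xs (i0 + 1)).foldl brStepB (PySem.Set.add k i0, false, oi)).2.2 :=
            fun h => by have := hge h; omega
          have hcond : ¬(((PySem.List.enumerate xs (i0 + 1)).foldl brStepB (PySem.Set.add k i0, false, oi)).2.1 = true ∧
              ((PySem.List.enumerate xs (i0 + 1)).foldl brStepB (PySem.Set.add k i0, false, oi)).2.2 = oi) :=
            fun hc => by have := hge hc.1; omega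
          have hcK : PySem.Set.contains
              (brFinKeep ((PySem.List.enumerate xs (i0 + 1)).foldl brStepB (PySem.Set.add k i0, false, oi))) i0 = true := by
            rw [brContains_brFinKeep_of_ne _ _ hne]
            rw [(brFoldB_facts xs (i0 + 1) (PySem.Set.add k i0) false oi).1 i0 (by omega)]
            simp [PySem.Set.mem_add]
          simp [brFilterK, brMem_of_contains hcK, hcond]
        · by_cases hop : x = "("
          · subst hop
            have ha : brStepA (u ++ "(" :: v, 1, some (u.length : Int)) "("
                = (u ++ "(" :: v, 1, some (u.length : Int)) := by simp [brStepA]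
            have hb : brStepB (k, true, oi) (i0, "(") = (k, true, oi) := by simp [brStepB]
            rw [ha, hb, (ih (i0 + 1) k oi (fun j hj => by have := hk j hj; omega)).2 u v (by omega)]
            have hc0 : PySem.Set.contains
                (brFinKeep ((PySem.List.enumerate xs (i0 + 1)).foldl brStepB (k, true, oi))) i0 = false := by
              apply brContains_brFinKeep_false
              rw [(brFoldB_facts xs (i0 + 1) k true oi).1 i0 (by omega)]
              exact hkF
            simp [brFilterK, brNotMem_of_contains hc0]
          · have ha : brStepA (u ++ "(" :: v, 1, some (u.length : Int)) x
                = (u ++ "(" :: (v ++ [x]), 1, some (u.length : Int)) := by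
              simp [brStepA, hop, hcl]
            have hb : brStepB (k, true, oi) (i0, x) = (k, true, oi) := by
              simp [brStepB, hop, hcl]
            rw [ha, hb, (ih (i0 + 1) k oi (fun j hj => by have := hk j hj; omega)).2 u (v ++ [x]) (by omega)]
            cases hc : (((PySem.List.enumerate xs (i0 + 1)).foldl brStepB (k, true, oi)).2.1 &&
                (((PySem.List.enumerate xs (i0 + 1)).foldl brStepB (k, true, oi)).2.2 == oi)) with
            | false => simp [brFilterK, hop, hcl]
            | true => simp [brFilterK, hop, hcl]

-- ===== VERDICT (by name: the statement is the Claim_ definition above) =====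
theorem brackets1_spec : Claim_equal_brackets1 := by
  intro lst _
  unfold Spec_brackets1 brackets1 brackets1_alt
  rw [brFilterK_bridge]
  have h := (brMain lst 0 PySem.Set.empty (-1)
      (by intro j hj; simp [PySem.Set.empty] at hj)).1 [] none
  simpa [brFinKeep] using h
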